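-- pv_equiv track=rewrite | github.com/elanzuo/NeepWords | src/neep_mcp/server.py | _sanitize_wildcard
-- ===== SOURCE A (Python) =====
-- MAX_WORD_LENGTH = 64
--
-- def _sanitize_wildcard(value: str) -> tuple[str | None, list[str]]:
--     warnings: list[str] = []
--     if value is None:
--         return None, ["empty_input"]
--     raw = str(value).strip()
--     if not raw:
--         return None, ["empty_input"]
--
--     cleaned_chars: list[str] = []
--     has_letter = False
--     for ch in raw:
--         if "A" <= ch <= "Z":
--             cleaned_chars.append(ch.lower())
--             has_letter = True
--             if ch != ch.lower():
--                 warnings.append("normalized_input")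
--         elif "a" <= ch <= "z":
--             cleaned_chars.append(ch)
--             has_letter = True
--         elif ch in {"-", "%", "_"}:
--             cleaned_chars.append(ch)
--         else:
--             return None, ["invalid_characters"]
--
--     cleaned = "".join(cleaned_chars)
--     if not cleaned:
--         return None, ["empty_input"]
--     if not has_letter:
--         return None, ["no_english_tokens"]
--     if len(cleaned) > MAX_WORD_LENGTH:
--         return None, ["too_long"]
--     return cleaned, warnings
-- ===== SOURCE B (Python) =====
-- import re
--
-- MAX_WORD_LENGTH = 64
--
-- def _sanitize_wildcard(value):
--     if value is None:
--         return None, ["empty_input"]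
--     raw = str(value).strip()
--     if not raw:
--         return None, ["empty_input"]
--     if not re.fullmatch(r"[A-Za-z%_-]+", raw):
--         return None, ["invalid_characters"]
--     if not re.search(r"[A-Za-z]", raw):
--         return None, ["no_english_tokens"]
--     if len(raw) > MAX_WORD_LENGTH:
--         return None, ["too_long"]
--     cleaned = raw.lower()
--     warnings = ["normalized_input"] if cleaned != raw else []
--     return cleaned, warnings
-- ===== Notes on version B (the rewrite author's own statement) =====
-- stated objective: idiomatic
-- what changed: Replaces A's single character-by-character loop with accumulated state (cleaned chars, letter flag, warnings list) by regex whole-string validation (fullmatch for the character class, search for a letter), a length check on the stripped string, and lowercasing it in one call, emitting a single normalization warning when lowercasing changed the string.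
-- intended difference: On valid inputs whose stripped form contains two or more uppercase letters, A returns the normalization warning duplicated once per uppercase letter (an accident of its per-character accumulation), while B returns that warning exactly once, which is the intended single notice that normalization occurred. — e.g. on _sanitize_wildcard("AB"): A returns (some "ab", ["normalized_input", "normalized_input"]), B returns (some "ab", ["normalized_input"])
import Mathlib
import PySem

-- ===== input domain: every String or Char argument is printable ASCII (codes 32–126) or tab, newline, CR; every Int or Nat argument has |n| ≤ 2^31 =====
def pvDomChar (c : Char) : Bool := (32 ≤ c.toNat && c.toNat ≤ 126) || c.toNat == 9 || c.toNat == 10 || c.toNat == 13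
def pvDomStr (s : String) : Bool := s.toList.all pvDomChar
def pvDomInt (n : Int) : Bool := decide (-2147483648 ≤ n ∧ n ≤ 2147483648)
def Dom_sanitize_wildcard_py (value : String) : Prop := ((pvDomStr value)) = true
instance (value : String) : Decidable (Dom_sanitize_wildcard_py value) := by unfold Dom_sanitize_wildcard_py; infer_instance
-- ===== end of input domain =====

-- B validates with regex-style whole-string passes and emits one 'normalized_input' warning when lowering
-- changed the string; A duplicates that warning once per uppercase letter (stated as D_ below). Objective: idiomatic.

-- ===== PORT A =====
-- the for-loop of A: state = (cleaned_chars, has_letter, warnings); none = early 'invalid_characters' return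
def sanitizeLoopA : List Char → List Char → Bool → List String → Option (List Char × Bool × List String)
  | [], cs, hl, ws => some (cs, hl, ws)
  | ch :: rest, cs, hl, ws =>
    if 'A' ≤ ch ∧ ch ≤ 'Z' then
      sanitizeLoopA rest (cs ++ [PySem.Chars.lowerChar ch]) true
        (if ch ≠ PySem.Chars.lowerChar ch then ws ++ ["normalized_input"] else ws)
    else if 'a' ≤ ch ∧ ch ≤ 'z' then
      sanitizeLoopA rest (cs ++ [ch]) true ws
    else if ch = '-' ∨ ch = '%' ∨ ch = '_' then
      sanitizeLoopA rest (cs ++ [ch]) hl ws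
    else
      none

def sanitize_wildcard_py (value : String) : Option String × List String :=
  let raw := PySem.Str.strip value
  if raw.toList = [] then (none, ["empty_input"])
  else
    match sanitizeLoopA raw.toList [] false [] with
    | none => (none, ["invalid_characters"])
    | some (cs, hl, ws) =>
      if cs = [] then (none, ["empty_input"])
      else if hl = false then (none, ["no_english_tokens"])
      else if cs.length > 64 then (none, ["too_long"])
      else (some (String.ofList cs), ws)

-- ===== PORT B =====
-- re.fullmatch(r'[A-Za-z%_-]+', raw) on a nonempty raw: every character is in the class
def sanitizeAllowedB (c : Char) : Bool :=
  decide ('A' ≤ c ∧ c ≤ 'Z') || decide ('a' ≤ c ∧ c ≤ 'z') || c == '%' || c == '_' || c == '-'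

-- re.search(r'[A-Za-z]', raw): some character is an ASCII letter
def sanitizeLetterB (c : Char) : Bool :=
  decide ('A' ≤ c ∧ c ≤ 'Z') || decide ('a' ≤ c ∧ c ≤ 'z')

def sanitize_wildcard_py_alt (value : String) : Option String × List String :=
  let raw := PySem.Str.strip value
  if raw.toList = [] then (none, ["empty_input"])
  else if ¬ (raw.toList.all sanitizeAllowedB) then (none, ["invalid_characters"])
  else if ¬ (raw.toList.any sanitizeLetterB) then (none, ["no_english_tokens"])
  else if raw.toList.length > 64 then (none, ["too_long"])
  else
    let cleaned := PySem.Str.lower raw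
    (some cleaned, if cleaned ≠ raw then ["normalized_input"] else [])

-- ===== PRECONDITION & SPEC =====
-- On valid inputs whose stripped form contains two or more uppercase letters, A returns the
-- normalization warning duplicated once per uppercase letter (an accident of its per-character
-- accumulation), while B returns that warning exactly once, the intended single notice.
def D_sanitize_wildcard_py (value : String) : Prop :=
  ((PySem.Str.strip value).toList.all (fun c => c.isAlpha || c == '%' || c == '_' || c == '-') = true) ∧
  ((PySem.Str.strip value).toList.length ≤ 64) ∧
  (2 ≤ (PySem.Str.strip value).toList.countP (·.isUpper))
instance (value : String) : Decidable (D_sanitize_wildcard_py value) := by unfold D_sanitize_wildcard_py; infer_instance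

def Spec_sanitize_wildcard_py (value : String) (out : Option String × List String) : Prop := ¬ D_sanitize_wildcard_py value → out = sanitize_wildcard_py_alt value
instance (value : String) (out : Option String × List String) : Decidable (Spec_sanitize_wildcard_py value out) := by unfold Spec_sanitize_wildcard_py; infer_instance

def pvDiffWitness_sanitize_wildcard_py : String := "AB"
def pvDiffWitnessOut_sanitize_wildcard_py : (Option String × List String) × (Option String × List String) :=
  ((some "ab", ["normalized_input", "normalized_input"]), (some "ab", ["normalized_input"]))

-- ===== CLAIM (what is proved, stated in full; the proofs are below) =====
def Claim_unchanged_sanitize_wildcard_py : Prop := ∀ (value : String), Dom_sanitize_wildcard_py value → Spec_sanitize_wildcard_py value (sanitize_wildcard_py value)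
def Claim_changed_sanitize_wildcard_py : Prop := Dom_sanitize_wildcard_py (pvDiffWitness_sanitize_wildcard_py) ∧ D_sanitize_wildcard_py (pvDiffWitness_sanitize_wildcard_py) ∧ sanitize_wildcard_py (pvDiffWitness_sanitize_wildcard_py) = pvDiffWitnessOut_sanitize_wildcard_py.1 ∧ sanitize_wildcard_py_alt (pvDiffWitness_sanitize_wildcard_py) = pvDiffWitnessOut_sanitize_wildcard_py.2 ∧ pvDiffWitnessOut_sanitize_wildcard_py.1 ≠ pvDiffWitnessOut_sanitize_wildcard_py.2
def Claim_exact_sanitize_wildcard_py : Prop := ∀ (value : String), Dom_sanitize_wildcard_py value → D_sanitize_wildcard_py value → sanitize_wildcard_py value ≠ sanitize_wildcard_py_alt value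

-- ===== LEMMAS AND PROOFS =====

-- A's loop, characterised by whole-string passes (B's quantities), with general accumulators
theorem sanitizeLoopA_spec (l : List Char) (cs : List Char) (hl : Bool) (ws : List String) :
    sanitizeLoopA l cs hl ws =
      if l.all sanitizeAllowedB then
        some (cs ++ l.map PySem.Chars.lowerChar, hl || l.any sanitizeLetterB,
          ws ++ List.replicate (l.countP (fun c => decide ('A' ≤ c ∧ c ≤ 'Z')) ) "normalized_input")
      else none := by
  induction l generalizing cs hl ws with
  | nil => simp [sanitizeLoopA]
  | cons ch rest ih =>
    rw [sanitizeLoopA]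
    by_cases hUp : 'A' ≤ ch ∧ ch ≤ 'Z'
    · have hne : ch ≠ PySem.Chars.lowerChar ch := by
        simp only [PySem.Chars.lowerChar, PySem.Chars.isupper, hUp.1, hUp.2, decide_true,
          Bool.and_self, if_pos]
        intro h
        have h1 : ch.toNat = (Char.ofNat (ch.toNat + 32)).toNat := by rw [← h]
        have hval : (Char.ofNat (ch.toNat + 32)).toNat = ch.toNat + 32 := by
          rw [Char.toNat_ofNat]
          have hz : ch.toNat ≤ 90 := by
            have h2 := hUp.2; simp [Char.le_def] at h2; exact h2
          have hv : Nat.isValidChar (ch.toNat + 32) := Or.inl (by omega)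
          simp [hv]
        omega
      have hAllow : sanitizeAllowedB ch = true := by simp [sanitizeAllowedB, hUp]
      have hLet : sanitizeLetterB ch = true := by simp [sanitizeLetterB, hUp]
      rw [if_pos hUp, if_pos hne, ih]
      by_cases hall : rest.all sanitizeAllowedB
      · rw [if_pos hall, if_pos (by simp [List.all_cons, hAllow, hall])]
        simp [hUp, hLet, List.replicate_succ, List.append_assoc]
      · rw [if_neg hall, if_neg (by simp [List.all_cons, hall])]
    · rw [if_neg hUp]
      by_cases hLo : 'a' ≤ ch ∧ ch ≤ 'z'
      · have hLow : PySem.Chars.lowerChar ch = ch := by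
          simp only [PySem.Chars.lowerChar, PySem.Chars.isupper]
          rw [if_neg]; simp [hUp]
        have hAllow : sanitizeAllowedB ch = true := by simp [sanitizeAllowedB, hLo]
        have hLet : sanitizeLetterB ch = true := by simp [sanitizeLetterB, hLo]
        rw [if_pos hLo, ih]
        by_cases hall : rest.all sanitizeAllowedB
        · rw [if_pos hall, if_pos (by simp [List.all_cons, hAllow, hall])]
          simp [hUp, hLet, hLow, List.append_assoc]
        · rw [if_neg hall, if_neg (by simp [List.all_cons, hall])]
      · rw [if_neg hLo]
        by_cases hSym : ch = '-' ∨ ch = '%' ∨ ch = '_'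
        · have hLow : PySem.Chars.lowerChar ch = ch := by
            simp only [PySem.Chars.lowerChar, PySem.Chars.isupper]
            rw [if_neg]; simp [hUp]
          have hAllow : sanitizeAllowedB ch = true := by
            rcases hSym with h | h | h <;> simp [sanitizeAllowedB, h]
          have hLet : sanitizeLetterB ch = false := by simp [sanitizeLetterB, hUp, hLo]
          rw [if_pos hSym, ih]
          by_cases hall : rest.all sanitizeAllowedB
          · rw [if_pos hall, if_pos (by simp [List.all_cons, hAllow, hall])]
            simp [hUp, hLet, hLow, List.append_assoc]
          · rw [if_neg hall, if_neg (by simp [List.all_cons, hall])]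
        · have hAllow : sanitizeAllowedB ch = false := by
            simp only [sanitizeAllowedB, Bool.or_eq_false_iff, beq_eq_false_iff_ne, ne_eq,
              decide_eq_false_iff_not]
            refine ⟨⟨⟨⟨hUp, hLo⟩, ?_⟩, ?_⟩, ?_⟩ <;> intro h <;> exact hSym (by simp [h])
          rw [if_neg hSym, if_neg (by simp [List.all_cons, hAllow])]

-- lowering a list of chars is the identity iff it contains no ASCII uppercase letter
theorem lower_eq_self_iff (l : List Char) :
    (l.map PySem.Chars.lowerChar = l) ↔ l.countP (fun c => decide ('A' ≤ c ∧ c ≤ 'Z')) = 0 := by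
  induction l with
  | nil => simp
  | cons ch rest ih =>
    simp only [List.map_cons, List.cons.injEq, List.countP_cons]
    by_cases hUp : 'A' ≤ ch ∧ ch ≤ 'Z'
    · have hne : PySem.Chars.lowerChar ch ≠ ch := by
        simp only [PySem.Chars.lowerChar, PySem.Chars.isupper, hUp.1, hUp.2, decide_true,
          Bool.and_self, if_pos]
        intro h
        have h1 : (Char.ofNat (ch.toNat + 32)).toNat = ch.toNat := by rw [h]
        have hval : (Char.ofNat (ch.toNat + 32)).toNat = ch.toNat + 32 := by
          rw [Char.toNat_ofNat]
          have hz : ch.toNat ≤ 90 := by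
            have h2 := hUp.2; simp [Char.le_def] at h2; exact h2
          have hv : Nat.isValidChar (ch.toNat + 32) := Or.inl (by omega)
          simp [hv]
        omega
      simp [hUp, hne]
    · have heq : PySem.Chars.lowerChar ch = ch := by
        simp only [PySem.Chars.lowerChar, PySem.Chars.isupper]
        rw [if_neg]; simp [hUp]
      simp [hUp, heq, ih]

-- D_'s Char.isAlpha / Char.isUpper predicates coincide with the ports' explicit range checks
theorem allowed_pred_eq (c : Char) :
    (c.isAlpha || c == '%' || c == '_' || c == '-') = sanitizeAllowedB c := by
  simp only [sanitizeAllowedB, Char.isAlpha, Char.isUpper, Char.isLower]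
  by_cases h1 : (65 : UInt32) ≤ c.val <;> by_cases h2 : c.val ≤ 90 <;>
    by_cases h3 : (97 : UInt32) ≤ c.val <;> by_cases h4 : c.val ≤ 122 <;>
    simp [Char.le_def, h1, h2, h3, h4]

theorem all_allowed_eq (l : List Char) :
    l.all (fun c => c.isAlpha || c == '%' || c == '_' || c == '-') = l.all sanitizeAllowedB := by
  simp only [allowed_pred_eq]

theorem upper_pred_eq (c : Char) : c.isUpper = decide ('A' ≤ c ∧ c ≤ 'Z') := by
  simp [Char.isUpper, Char.le_def]

theorem countP_upper_eq (l : List Char) :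
    l.countP (·.isUpper) = l.countP (fun c => decide ('A' ≤ c ∧ c ≤ 'Z')) := by
  apply List.countP_congr
  intro c _
  simp [upper_pred_eq]

-- the ∧-form and &&-form of the uppercase count coincide (simp normalises decide of a conjunction)
theorem countP_and_eq (l : List Char) :
    l.countP (fun c => decide ('A' ≤ c) && decide (c ≤ 'Z'))
      = l.countP (fun c => decide ('A' ≤ c ∧ c ≤ 'Z')) := by
  apply List.countP_congr
  intro c _
  by_cases h1 : 'A' ≤ c <;> by_cases h2 : c ≤ 'Z' <;> simp [h1, h2]

-- ===== VERDICT (by name: the statement is the Claim_ definition above) =====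
theorem sanitize_wildcard_py_spec : Claim_unchanged_sanitize_wildcard_py := by
  intro value _ hnD
  unfold D_sanitize_wildcard_py at hnD
  unfold sanitize_wildcard_py sanitize_wildcard_py_alt
  set raw := PySem.Str.strip value with hraw
  by_cases hemp : raw.toList = []
  · simp [hemp]
  · simp only [hemp, if_false, sanitizeLoopA_spec]
    by_cases hall : raw.toList.all sanitizeAllowedB
    · have hne : raw.toList.map PySem.Chars.lowerChar ≠ [] := by simpa using hemp
      simp only [hall, if_pos, Bool.false_or, List.nil_append]
      by_cases hany : raw.toList.any sanitizeLetterB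
      · have hlower : (PySem.Str.lower raw).toList = raw.toList.map PySem.Chars.lowerChar := by
          simp [PySem.Str.toList_lower, PySem.Chars.lower]
        have hmk : String.ofList (raw.toList.map PySem.Chars.lowerChar) = PySem.Str.lower raw := by
          apply String.ext; simp [hlower]
        by_cases hbig : raw.toList.length > 64
        · have hbigS : 64 < raw.length := by simpa using hbig
          simp [hany, hne, hbigS]
        · have hbigS : ¬ 64 < raw.length := by simpa using hbig
          have hcnt : raw.toList.countP (fun c => decide ('A' ≤ c ∧ c ≤ 'Z')) ≤ 1 := by
            by_contra hc
            exact hnD ⟨by rw [all_allowed_eq]; exact hall, by omega,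
              by rw [countP_upper_eq]; omega⟩
          have hiff := lower_eq_self_iff raw.toList
          rcases Nat.le_one_iff_eq_zero_or_eq_one.mp hcnt with hcv | hcv
          · have hEq : PySem.Str.lower raw = raw := by
              apply String.ext; rw [hlower]; exact hiff.mpr hcv
            have hcvB : raw.toList.countP (fun c => decide ('A' ≤ c) && decide (c ≤ 'Z')) = 0 := by
              rw [countP_and_eq]; exact hcv
            simp [hany, hne, hbigS, hmk, hcvB, hEq]
          · have hNe : PySem.Str.lower raw ≠ raw := by
              intro h
              have hmap : raw.toList.map PySem.Chars.lowerChar = raw.toList := by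
                rw [← hlower, h]
              rw [hiff.mp hmap] at hcv; omega
            have hcvB : raw.toList.countP (fun c => decide ('A' ≤ c) && decide (c ≤ 'Z')) = 1 := by
              rw [countP_and_eq]; exact hcv
            simp [hany, hne, hbigS, hmk, hcvB, hNe]
      · simp [hany, hne]
    · simp [hall]

theorem sanitize_wildcard_py_changed : Claim_changed_sanitize_wildcard_py := by
  unfold Claim_changed_sanitize_wildcard_py; decide

theorem sanitize_wildcard_py_tight : Claim_exact_sanitize_wildcard_py := by
  intro value _ hD
  unfold D_sanitize_wildcard_py at hD
  obtain ⟨hallD, hlen, hcnt0⟩ := hD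
  unfold sanitize_wildcard_py sanitize_wildcard_py_alt
  set raw := PySem.Str.strip value with hraw
  have hall : raw.toList.all sanitizeAllowedB := by rw [← all_allowed_eq]; exact hallD
  have hcnt : 2 ≤ raw.toList.countP (fun c => decide ('A' ≤ c ∧ c ≤ 'Z')) := by
    rw [← countP_upper_eq]; exact hcnt0
  have hemp : raw.toList ≠ [] := by
    intro h; rw [h] at hcnt; simp at hcnt
  have hany : raw.toList.any sanitizeLetterB := by
    rcases List.countP_pos_iff.mp (by omega :
        0 < raw.toList.countP (fun c => decide ('A' ≤ c ∧ c ≤ 'Z'))) with ⟨c, hc, hcp⟩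
    refine List.any_eq_true.mpr ⟨c, hc, ?_⟩
    simp only [decide_eq_true_eq] at hcp
    simp [sanitizeLetterB, hcp]
  have hne : raw.toList.map PySem.Chars.lowerChar ≠ [] := by simpa using hemp
  simp only [hemp, if_false, sanitizeLoopA_spec, hall, if_true, Bool.false_or,
    List.nil_append, hany]
  rw [if_neg hne]
  rw [if_neg (show ¬ (true = false) by simp)]
  rw [if_neg (show ¬ (List.map PySem.Chars.lowerChar raw.toList).length > 64 by
    simp only [List.length_map]; omega)]
  intro heq
  have hcntB : 2 ≤ raw.toList.countP (fun c => decide ('A' ≤ c) && decide (c ≤ 'Z')) := by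
    rw [countP_and_eq]; exact hcnt
  have h2 := congrArg Prod.snd heq
  simp only at h2
  have h3 := congrArg List.length h2
  simp only [List.length_replicate] at h3
  split_ifs at h3 <;>
    first
      | omega
      | (simp only [List.length_nil, List.length_cons] at h3; omega)
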